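-- pv_equiv track=rewrite | github.com/microsoft/HiTab | qa/nsm/execution/executor.py | find_branch_per_level
-- ===== SOURCE A (Python) =====
-- def find_branch_per_level(coord_list):  # NOT USED
--     """ Find branch per level by coord list."""
--     branch_per_level = [False]  # virtual node <LEFT> | <TOP> always not branch
--     if len(coord_list) == 0:
--         return branch_per_level
--     for level in range(len(coord_list[0])):
--         group_set = set()
--         for coord in coord_list:
--             if coord[level] != -1:
--                 group_set.add(coord[level])
--         branch_per_level.append(len(group_set) > 1)
--     return branch_per_level
-- ===== SOURCE B (Python) =====
-- def find_branch_per_level(coord_list):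
--     """ Find branch per level by coord list."""
--     if len(coord_list) == 0:
--         return [False]
--     # per level: (first non-(-1) value seen or None, branch flag); one row-major pass
--     state = [(None, False) for _ in range(len(coord_list[0]))]
--     for coord in coord_list:
--         for i, c in zip(range(len(state)), coord):
--             if c != -1:
--                 first, branch = state[i]
--                 if first is None:
--                     state[i] = (c, branch)
--                 elif c != first:
--                     state[i] = (first, True)
--     return [False] + [branch for _, branch in state]
-- ===== Notes on version B (the rewrite author's own statement) =====
-- stated objective: alternative
-- what changed: Replaces the level-major double loop that builds a Python set per level with a single row-major pass maintaining, per level, only the first non-(-1) value seen and a branch flag.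
import Mathlib
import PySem

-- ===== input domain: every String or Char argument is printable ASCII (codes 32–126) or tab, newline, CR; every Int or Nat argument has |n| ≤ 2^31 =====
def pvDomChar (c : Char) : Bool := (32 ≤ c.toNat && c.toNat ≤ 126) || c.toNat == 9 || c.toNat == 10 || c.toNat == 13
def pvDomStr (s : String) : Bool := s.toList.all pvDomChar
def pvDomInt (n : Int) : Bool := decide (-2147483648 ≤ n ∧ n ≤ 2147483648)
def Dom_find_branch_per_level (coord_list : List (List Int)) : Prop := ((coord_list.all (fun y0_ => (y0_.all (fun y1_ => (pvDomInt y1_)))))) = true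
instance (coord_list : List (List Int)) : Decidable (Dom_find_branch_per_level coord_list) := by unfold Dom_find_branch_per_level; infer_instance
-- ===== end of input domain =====

-- B replaces A's level-major set-per-level scan by one row-major pass keeping a first-value + flag per level.

-- ===== PORT A =====
def find_branch_per_level (coord_list : List (List Int)) : List Bool :=
  let branch_per_level : List Bool := [false]
  match coord_list with
  | [] => branch_per_level
  | h :: _ =>
    (PySem.List.pyRange 0 (h.length : Int) 1).foldl (fun acc level =>
      let group_set : PySem.Set Int := coord_list.foldl (fun s coord =>
        if PySem.List.pyGetD coord level 0 ≠ -1 then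
          PySem.Set.add s (PySem.List.pyGetD coord level 0)
        else s) PySem.Set.empty
      acc ++ [decide (1 < PySem.Set.len group_set)]) branch_per_level

-- ===== PORT B =====
-- inner loop of B: 'for i, c in zip(range(len(state)), coord)' updating state[i]
def pvUpdRow : List (Option Int × Bool) → List Int → List (Option Int × Bool)
  | [], _ => []
  | st, [] => st
  | (f, b) :: st, c :: cs =>
    (if c ≠ -1 then
       match f with
       | none => (some c, b)
       | some v => if c ≠ v then (some v, true) else (some v, b)
     else (f, b)) :: pvUpdRow st cs

def find_branch_per_level_alt (coord_list : List (List Int)) : List Bool :=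
  match coord_list with
  | [] => [false]
  | h :: _ =>
    let st := coord_list.foldl pvUpdRow (List.replicate h.length ((none : Option Int), false))
    false :: st.map (·.2)

-- ===== PRECONDITION & SPEC =====
-- Pre_ excludes exactly the ragged inputs on which A raises IndexError (a row shorter than the first row).
def Pre_find_branch_per_level (coord_list : List (List Int)) : Prop :=
  ∀ r ∈ coord_list, coord_list.headI.length ≤ r.length
instance (coord_list : List (List Int)) : Decidable (Pre_find_branch_per_level coord_list) := by
  unfold Pre_find_branch_per_level; infer_instance
def pvWitness_find_branch_per_level : List (List Int) := [[1, -1], [2, 3], [1, 3]]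

def Spec_find_branch_per_level (coord_list : List (List Int)) (out : List Bool) : Prop := out = find_branch_per_level_alt coord_list
instance (coord_list : List (List Int)) (out : List Bool) : Decidable (Spec_find_branch_per_level coord_list out) := by unfold Spec_find_branch_per_level; infer_instance

-- ===== CLAIM (what is proved, stated in full; the proofs are below) =====
def Claim_equal_find_branch_per_level : Prop := ∀ (coord_list : List (List Int)), Dom_find_branch_per_level coord_list → Pre_find_branch_per_level coord_list → Spec_find_branch_per_level coord_list (find_branch_per_level coord_list)

-- ===== LEMMAS AND PROOFS =====

-- per-cell step corresponding to one row's contribution at one level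
def pvStepCell (cell : Option Int × Bool) (c : Int) : Option Int × Bool :=
  if c ≠ -1 then
    match cell.1 with
    | none => (some c, cell.2)
    | some v => if c ≠ v then (some v, true) else (some v, cell.2)
  else cell

-- A's set step at one level
def pvStepSet (s : PySem.Set Int) (c : Int) : PySem.Set Int :=
  if c ≠ -1 then PySem.Set.add s c else s

theorem pvUpdRow_length (st : List (Option Int × Bool)) (coord : List Int) :
    (pvUpdRow st coord).length = st.length := by
  induction st generalizing coord with
  | nil => simp [pvUpdRow]
  | cons hd tl ih =>
    cases coord with
    | nil => rfl
    | cons c cs => obtain ⟨f, b⟩ := hd; simp [pvUpdRow, ih]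

theorem pvUpdRow_getElem (st : List (Option Int × Bool)) (coord : List Int)
    (hlen : st.length ≤ coord.length) (k : Nat) (hk : k < st.length) :
    (pvUpdRow st coord)[k]'(by rw [pvUpdRow_length]; exact hk) =
      pvStepCell st[k] (coord.getD k 0) := by
  induction st generalizing coord k with
  | nil => simp at hk
  | cons hd tl ih =>
    cases coord with
    | nil => simp at hlen
    | cons c cs =>
      obtain ⟨f, b⟩ := hd
      cases k with
      | zero => simp [pvUpdRow, pvStepCell]
      | succ k =>
        simp only [pvUpdRow]
        simpa using ih cs (by simpa using hlen) k (by simpa using hk)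

theorem pvFold_length (rows : List (List Int)) (st : List (Option Int × Bool)) :
    (rows.foldl pvUpdRow st).length = st.length := by
  induction rows generalizing st with
  | nil => rfl
  | cons r rs ih => rw [List.foldl_cons, ih, pvUpdRow_length]

-- loop interchange: the row-major fold, viewed at one level, is a column fold
theorem pvFold_getElem (rows : List (List Int)) (st : List (Option Int × Bool))
    (hlen : ∀ r ∈ rows, st.length ≤ r.length) (k : Nat) (hk : k < st.length) :
    (rows.foldl pvUpdRow st)[k]'(by rw [pvFold_length]; exact hk) =
      rows.foldl (fun cell r => pvStepCell cell (r.getD k 0)) st[k] := by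
  induction rows generalizing st with
  | nil => rfl
  | cons r rs ih =>
    simp only [List.foldl_cons]
    have h1 : (pvUpdRow st r).length = st.length := pvUpdRow_length st r
    have := ih (pvUpdRow st r) (by intro q hq; rw [h1]; exact hlen q (by simp [hq]))
      (by omega)
    rw [this, pvUpdRow_getElem st r (hlen r (by simp)) k hk]

-- invariant relating A's set to B's cell along one column
def pvInv (s : PySem.Set Int) (cell : Option Int × Bool) : Prop :=
  (cell.1 = none ∧ cell.2 = false ∧ s = []) ∨
  (∃ v, cell.1 = some v ∧ cell.2 = false ∧ s = [v]) ∨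
  (cell.2 = true ∧ 2 ≤ s.length)

theorem pvInv_step (s : PySem.Set Int) (cell : Option Int × Bool) (c : Int)
    (h : pvInv s cell) : pvInv (pvStepSet s c) (pvStepCell cell c) := by
  obtain ⟨f, b⟩ := cell
  by_cases hc : c = -1
  · simpa [pvStepSet, pvStepCell, hc] using h
  · rcases h with ⟨h1, h2, h3⟩ | ⟨v, h1, h2, h3⟩ | ⟨h1, h2⟩
    · simp only at h1 h2
      subst h1 h2 h3
      refine Or.inr (Or.inl ⟨c, by simp [pvStepCell, hc], by simp [pvStepCell, hc], ?_⟩)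
      simp [pvStepSet, hc, PySem.Set.add, PySem.Set.contains]
    · simp only at h1 h2
      subst h1 h2 h3
      by_cases hcv : c = v
      · refine Or.inr (Or.inl ⟨v, by simp [pvStepCell, hcv], by simp [pvStepCell, hcv], ?_⟩)
        simp [pvStepSet, hcv, PySem.Set.add, PySem.Set.contains]
      · refine Or.inr (Or.inr ⟨by simp [pvStepCell, hc, hcv], ?_⟩)
        have hs : pvStepSet [v] c = [v, c] := by
          simp [pvStepSet, hc, PySem.Set.add, PySem.Set.contains, hcv]
        rw [hs]; simp
    · refine Or.inr (Or.inr ⟨?_, ?_⟩)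
      · subst h1
        cases f with
        | none => simp [pvStepCell, hc]
        | some v => by_cases hcv : c = v <;> simp [pvStepCell, hc, hcv]
      · unfold pvStepSet
        have hle : s.length ≤ (PySem.Set.add s c).length := by
          simp only [PySem.Set.add]; split <;> simp
        split <;> omega

theorem pvInv_fold (xs : List Int) (s : PySem.Set Int) (cell : Option Int × Bool)
    (h : pvInv s cell) : pvInv (xs.foldl pvStepSet s) (xs.foldl pvStepCell cell) := by
  induction xs generalizing s cell with
  | nil => exact h
  | cons x xs ih => exact ih _ _ (pvInv_step s cell x h)

theorem pvInv_flag (s : PySem.Set Int) (cell : Option Int × Bool)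
    (h : pvInv s cell) : cell.2 = decide (1 < PySem.Set.len s) := by
  rcases h with ⟨_, h2, h3⟩ | ⟨v, _, h2, h3⟩ | ⟨h1, h2⟩
  · subst h3; simp_all [PySem.Set.len]
  · subst h3; simp_all [PySem.Set.len]
  · simp_all [PySem.Set.len]; omega

theorem pvA_eq (h : List Int) (t : List (List Int)) :
    find_branch_per_level (h :: t) =
      false :: (List.range h.length).map (fun k =>
        decide (1 < PySem.Set.len (((h :: t).map (fun r => r.getD k 0)).foldl pvStepSet
          PySem.Set.empty))) := by
  unfold find_branch_per_level
  conv_lhs => whnf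
  rw [PySem.List.pyRange_one]
  simp only [Int.sub_zero, Int.toNat_natCast, List.foldl_map, zero_add]
  rw [PySem.List.foldl_append_singleton_eq_map]
  simp only [List.cons_append, List.nil_append]
  refine congrArg _ (List.map_congr_left fun k hk => ?_)
  simp only [PySem.List.pyGetD_natCast]
  rfl

theorem pvB_eq (h : List Int) (t : List (List Int))
    (hpre : ∀ r ∈ (h :: t), h.length ≤ r.length) :
    find_branch_per_level_alt (h :: t) =
      false :: (List.range h.length).map (fun k =>
        (((h :: t).map (fun r => r.getD k 0)).foldl pvStepCell
          ((none : Option Int), false)).2) := by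
  show false :: ((h :: t).foldl pvUpdRow (List.replicate h.length ((none : Option Int), false))).map (·.2) = _
  congr 1
  apply List.ext_getElem
  · simp [pvFold_length, pvUpdRow_length]
  · intro k hk1 hk2
    have hkn : k < h.length := by simpa using hk2
    have hrep : k < (List.replicate h.length ((none : Option Int), false)).length := by
      simpa using hkn
    have h1 :
        ((h :: t).foldl pvUpdRow (List.replicate h.length ((none : Option Int), false)))[k]'(by
            rw [pvFold_length]; exact hrep) =
          (h :: t).foldl (fun cell r => pvStepCell cell (r.getD k 0))
            (List.replicate h.length ((none : Option Int), false))[k] :=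
      pvFold_getElem (h :: t) _ (by intro r hr; simpa using hpre r hr) k hrep
    simp only [List.getElem_map, List.getElem_range]
    rw [h1, List.getElem_replicate, List.foldl_map]

-- ===== VERDICT (by name: the statement is the Claim_ definition above) =====
theorem find_branch_per_level_spec : Claim_equal_find_branch_per_level := by
  intro cl _dom hpre
  unfold Spec_find_branch_per_level
  cases cl with
  | nil => rfl
  | cons h t =>
    rw [pvA_eq, pvB_eq h t (by simpa [Pre_find_branch_per_level] using hpre)]
    congr 1
    refine List.map_congr_left (fun k _ => ?_)
    exact (pvInv_flag _ _ (pvInv_fold _ _ _ (Or.inl ⟨rfl, rfl, rfl⟩))).symm
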